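-- pv_equiv track=rewrite | github.com/TrellixVulnTeam/encoder_learning_benchmarks_I8I1 | encoder_learning_benchmarks/analyze.py | assemble_label_str
-- ===== SOURCE A (Python) =====
-- def assemble_label_str(components):
--     label_str = ""
--     for i in range(len(components)):
--         if i == 1:
--             label_str += " ("
--         if i >= 2:
--             label_str += ", "
--         if not components[i][2] is None:
--             label_str += components[i][2]
--         else:
--             label_str += components[i][0].split("/")[-1] + "=" + str(
--                 components[i][1])
--         if (i >= 1) and (i + 1 == len(components)):
--             label_str += ")"
--     return label_str
-- ===== SOURCE B (Python) =====
-- def _render(c):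
--     return c[2] if c[2] is not None else c[0].split("/")[-1] + "=" + str(c[1])
--
-- def assemble_label_str(components):
--     rendered = [_render(c) for c in components]
--     if not rendered:
--         return ""
--     head, tail = rendered[0], rendered[1:]
--     return head if not tail else head + " (" + ", ".join(tail) + ")"
-- ===== Notes on version B (the rewrite author's own statement) =====
-- stated objective: simpler
-- what changed: A's single index-driven loop with i==1/i>=2/last-index separator branches is replaced by a render pass over the components plus a closed-form assembly: head, and if a tail exists, ' (' + ', '.join(tail) + ')'.
import Mathlib
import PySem

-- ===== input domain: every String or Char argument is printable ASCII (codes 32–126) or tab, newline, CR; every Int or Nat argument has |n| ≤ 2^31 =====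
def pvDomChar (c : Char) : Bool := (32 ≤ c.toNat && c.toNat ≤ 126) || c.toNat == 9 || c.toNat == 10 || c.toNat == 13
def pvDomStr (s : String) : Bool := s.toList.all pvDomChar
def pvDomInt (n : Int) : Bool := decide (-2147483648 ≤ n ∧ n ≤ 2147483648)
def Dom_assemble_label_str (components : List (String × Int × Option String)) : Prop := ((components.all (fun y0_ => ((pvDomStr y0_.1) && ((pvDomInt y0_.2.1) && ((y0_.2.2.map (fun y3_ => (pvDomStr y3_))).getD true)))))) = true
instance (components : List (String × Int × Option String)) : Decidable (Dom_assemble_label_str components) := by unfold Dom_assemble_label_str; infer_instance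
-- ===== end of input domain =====

-- B renders each component with one helper and assembles head/" ("/", ".join(tail)/")" in closed form,
-- replacing A's single index-driven loop with its i==1 / i>=2 / last-index separator branches (objective: simpler).

-- ===== PORT A =====
-- literal transliteration of A: one fold over range(len(components)) carrying the accumulated string
def assemble_label_str (components : List (String × Int × Option String)) : String :=
  (PySem.List.pyRange 0 components.length 1).foldl (fun label_str i =>
    let label_str := if i == 1 then label_str ++ " (" else label_str
    let label_str := if i ≥ 2 then label_str ++ ", " else label_str
    let c := (PySem.List.pyGet? components i).getD ("", 0, none)   -- index always in range here
    let label_str :=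
      match c.2.2 with
      | some s => label_str ++ s
      | none => label_str ++
          ((PySem.List.pyGet? (((PySem.Str.split? c.1 "/").getD [])) (-1)).getD "" ++ "=" ++ PySem.Int.toStr c.2.1)
    if i ≥ 1 ∧ i + 1 = (components.length : Int) then label_str ++ ")" else label_str) ""

-- ===== PORT B =====
def pvRender (c : String × Int × Option String) : String :=
  match c.2.2 with
  | some s => s
  | none => (PySem.List.pyGet? (((PySem.Str.split? c.1 "/").getD [])) (-1)).getD "" ++ "=" ++ PySem.Int.toStr c.2.1

def assemble_label_str_alt (components : List (String × Int × Option String)) : String :=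
  match components.map pvRender with
  | [] => ""
  | head :: tail =>
    if tail.isEmpty then head
    else head ++ " (" ++ PySem.Str.join ", " tail ++ ")"

-- ===== PRECONDITION & SPEC =====
def Spec_assemble_label_str (components : List (String × Int × Option String)) (out : String) : Prop := out = assemble_label_str_alt components
instance (components : List (String × Int × Option String)) (out : String) : Decidable (Spec_assemble_label_str components out) := by unfold Spec_assemble_label_str; infer_instance

-- ===== CLAIM (what is proved, stated in full; the proofs are below) =====
def Claim_equal_assemble_label_str : Prop := ∀ (components : List (String × Int × Option String)), Dom_assemble_label_str components → Spec_assemble_label_str components (assemble_label_str components)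

-- ===== LEMMAS AND PROOFS =====

-- the loop body of A's port, with the list it indexes as a parameter
def pvStep (cs : List (String × Int × Option String)) (label_str : String) (i : Int) : String :=
  let label_str := if i == 1 then label_str ++ " (" else label_str
  let label_str := if i ≥ 2 then label_str ++ ", " else label_str
  let c := (PySem.List.pyGet? cs i).getD ("", 0, none)
  let label_str :=
    match c.2.2 with
    | some s => label_str ++ s
    | none => label_str ++
        ((PySem.List.pyGet? (((PySem.Str.split? c.1 "/").getD [])) (-1)).getD "" ++ "=" ++ PySem.Int.toStr c.2.1)
  if i ≥ 1 ∧ i + 1 = (cs.length : Int) then label_str ++ ")" else label_str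

theorem assemble_label_str_eq_fold (cs : List (String × Int × Option String)) :
    assemble_label_str cs = (PySem.List.pyRange 0 cs.length 1).foldl (pvStep cs) "" := rfl

theorem pvStep_mid (pre suf : List (String × Int × Option String)) (x : String × Int × Option String) (acc : String)
    (h2 : 2 ≤ pre.length) (hsuf : suf ≠ []) :
    pvStep (pre ++ x :: suf) acc (pre.length : Int) = acc ++ ", " ++ pvRender x := by
  unfold pvStep pvRender
  have hne : ((pre.length : Int) == 1) = false := beq_eq_false_iff_ne.mpr (by omega)
  have hget : PySem.List.pyGet? (pre ++ x :: suf) (pre.length : Int) = some x :=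
    PySem.List.pyGet?_append_length _ _ _
  have hlast : ¬ ((1 : Int) ≤ (pre.length : Int) ∧ (pre.length : Int) + 1 = ((pre ++ x :: suf).length : Int)) := by
    simp only [List.length_append, List.length_cons]
    have : suf.length ≠ 0 := by simpa using hsuf
    omega
  simp only [hne, Bool.false_eq_true, if_false, hget, Option.getD_some,
      ge_iff_le, hlast, if_pos (by exact_mod_cast h2 : (2:Int) ≤ (pre.length : Int))]
  cases x.2.2 <;> rfl

theorem pvStep_last (pre : List (String × Int × Option String)) (x : String × Int × Option String) (acc : String)
    (h2 : 2 ≤ pre.length) :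
    pvStep (pre ++ [x]) acc (pre.length : Int) = acc ++ ", " ++ pvRender x ++ ")" := by
  unfold pvStep pvRender
  have hne : ((pre.length : Int) == 1) = false := beq_eq_false_iff_ne.mpr (by omega)
  have hget : PySem.List.pyGet? (pre ++ [x]) (pre.length : Int) = some x :=
    PySem.List.pyGet?_append_length _ _ _
  have hlast : ((1 : Int) ≤ (pre.length : Int) ∧ (pre.length : Int) + 1 = ((pre ++ [x]).length : Int)) := by
    constructor
    · exact_mod_cast Nat.le_of_lt h2
    · simp only [List.length_append, List.length_cons, List.length_nil]
      push_cast; ring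
  simp only [hne, Bool.false_eq_true, if_false, hget, Option.getD_some,
      ge_iff_le, if_pos hlast, if_pos (by exact_mod_cast h2 : (2:Int) ≤ (pre.length : Int))]
  cases x.2.2 <;> rfl

theorem pvStep_zero (c : String × Int × Option String) (t : List (String × Int × Option String)) :
    pvStep (c :: t) "" 0 = pvRender c := by
  unfold pvStep pvRender
  have hlast : ¬ ((1 : Int) ≤ (0 : Int) ∧ (0 : Int) + 1 = (((c :: t).length : Int))) := by
    intro h; omega
  simp only [show ((0:Int) == 1) = false from rfl, Bool.false_eq_true, if_false,
      show ¬((2:Int) ≤ 0) by omega, ge_iff_le, if_false, hlast,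
      PySem.List.pyGet?_zero, List.getElem?_cons_zero, Option.getD_some]
  cases c.2.2 <;> simp

theorem pvStep_one (c d : String × Int × Option String) (t : List (String × Int × Option String)) (acc : String) :
    pvStep (c :: d :: t) acc 1 =
      if t = [] then acc ++ " (" ++ pvRender d ++ ")" else acc ++ " (" ++ pvRender d := by
  unfold pvStep pvRender
  have hget : PySem.List.pyGet? (c :: d :: t) 1 = some d := by
    rw [show (c :: d :: t) = [c] ++ d :: t from rfl,
        show (1 : Int) = (([c] : List (String × Int × Option String)).length : Int) by simp]
    exact PySem.List.pyGet?_append_length _ _ _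
  have hlast : ((1 : Int) ≥ 1 ∧ (1 : Int) + 1 = (((c :: d :: t).length : Int))) ↔ t = [] := by
    simp only [List.length_cons, ge_iff_le]
    constructor
    · rintro ⟨-, h⟩
      have : t.length = 0 := by omega
      simpa using this
    · rintro rfl
      simp
  simp only [show ((1:Int) == 1) = true from rfl, if_true, show ¬((1:Int) ≥ 2) by omega,
      if_false, hget, Option.getD_some]
  rw [if_congr hlast rfl rfl]
  by_cases ht : t = [] <;>
    simp only [ht, if_true, if_false] <;> cases d.2.2 <;> simp

-- the tail of the loop (indices ≥ 2) prepends ", " to each suffix element's render, and ")" at the end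
theorem pvFold_tail (suf : List (String × Int × Option String)) :
    ∀ (pre : List (String × Int × Option String)) (acc : String), 2 ≤ pre.length → suf ≠ [] →
    (PySem.List.pyRange (pre.length : Int) ((pre ++ suf).length : Int) 1).foldl (pvStep (pre ++ suf)) acc
      = acc ++ ", " ++ String.ofList (PySem.Chars.join (", ".toList) ((suf.map pvRender).map String.toList)) ++ ")" := by
  induction suf with
  | nil => intro _ _ _ h; exact absurd rfl h
  | cons x t ih =>
    intro pre acc h2 _
    cases t with
    | nil =>
      have hr : PySem.List.pyRange (pre.length : Int) ((pre ++ [x]).length : Int) 1 = [(pre.length : Int)] := by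
        have h : ((pre ++ [x]).length : Int) = (pre.length : Int) + 1 := by
          simp [List.length_append]
        rw [h]
        exact PySem.List.pyRange_one_singleton _
      rw [hr]
      simp only [List.foldl_cons, List.foldl_nil, pvStep_last pre x acc h2]
      apply String.toList_inj.mp
      simp [PySem.Chars.join_singleton]
    | cons y u =>
      have hlen : ((pre ++ x :: y :: u).length : Int) = ((pre.length : Int) + 1) + ((y :: u).length : Int) := by
        simp [List.length_append]; ring
      have hr : PySem.List.pyRange (pre.length : Int) ((pre ++ x :: y :: u).length : Int) 1
          = (pre.length : Int) :: PySem.List.pyRange ((pre.length : Int) + 1) ((pre ++ x :: y :: u).length : Int) 1 := by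
        apply PySem.List.pyRange_one_cons
        rw [hlen]
        have : (0:Int) < ((y :: u).length : Int) := by simp only [List.length_cons]; push_cast; omega
        omega
      rw [hr]
      simp only [List.foldl_cons]
      rw [pvStep_mid pre (y :: u) x acc h2 (by simp)]
      have hpre : pre ++ x :: y :: u = (pre ++ [x]) ++ y :: u := by simp
      have h2' : 2 ≤ (pre ++ [x]).length := by simp; omega
      have hih := ih (pre ++ [x]) (acc ++ ", " ++ pvRender x) h2' (by simp)
      rw [show ((pre ++ [x]).length : Int) = (pre.length : Int) + 1 by simp [List.length_append]] at hih
      rw [hpre, hih]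
      apply String.toList_inj.mp
      simp only [List.map_cons, PySem.Chars.join_cons_cons, String.toList_append, String.toList_ofList]
      simp

theorem assemble_render_cases (cs : List (String × Int × Option String)) :
    assemble_label_str cs = assemble_label_str_alt cs := by
  match cs with
  | [] => rfl
  | [c] =>
    rw [assemble_label_str_eq_fold]
    have h1 : PySem.List.pyRange 0 ((([c] : List (String × Int × Option String)).length : Int)) 1 = [0] := by
      simp only [List.length_cons, List.length_nil]
      decide
    rw [h1]
    simp only [List.foldl_cons, List.foldl_nil]
    unfold pvStep assemble_label_str_alt pvRender
    simp only [PySem.List.pyGet?_zero, List.getElem?_cons_zero, Option.getD_some]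
    cases hc : c.2.2 <;> simp [hc]
  | c :: d :: t =>
    rw [assemble_label_str_eq_fold]
    have hr : PySem.List.pyRange 0 ((c :: d :: t).length : Int) 1
        = 0 :: 1 :: PySem.List.pyRange 2 ((c :: d :: t).length : Int) 1 := by
      rw [PySem.List.pyRange_one_cons (by simp only [List.length_cons]; omega), PySem.List.pyRange_one_cons (by simp only [List.length_cons]; omega)]
      norm_num
    rw [hr]
    simp only [List.foldl_cons]
    rw [pvStep_zero c (d :: t), pvStep_one c d t (pvRender c)]
    cases t with
    | nil =>
      simp only [
        show ((([c, d] : List (String × Int × Option String)).length : Int)) = 2 by simp,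
        show PySem.List.pyRange (2:Int) (2:Int) 1 = [] from by decide, List.foldl_nil]
      unfold assemble_label_str_alt
      apply String.toList_inj.mp
      simp [PySem.Str.toList_join, PySem.Chars.join_singleton]
    | cons e u =>
      simp only [if_neg (by simp : ¬ ((e :: u : List (String × Int × Option String)) = []))]
      have hft := pvFold_tail (e :: u) [c, d] (pvRender c ++ " (" ++ pvRender d) (by simp) (by simp)
      simp only [show (([c, d] : List (String × Int × Option String)) ++ e :: u = c :: d :: e :: u) from rfl,
        show ((([c, d] : List (String × Int × Option String)).length : Int)) = 2 by simp] at hft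
      rw [hft]
      unfold assemble_label_str_alt
      apply String.toList_inj.mp
      simp only [List.map_cons, List.isEmpty_cons, Bool.false_eq_true, if_neg, not_false_eq_true,
        String.toList_append, String.toList_ofList, PySem.Str.toList_join, PySem.Chars.join_cons_cons]
      simp

-- ===== VERDICT (by name: the statement is the Claim_ definition above) =====
theorem assemble_label_str_spec : Claim_equal_assemble_label_str := by
  intro components _
  unfold Spec_assemble_label_str
  exact assemble_render_cases components
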